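-- pv_equiv track=rewrite | github.com/alexandraback/datacollection | solutions_5690574640250880_0/Python/diegoguemes/minesweeper_master.py | can_create_region_from
-- ===== SOURCE A (Python) =====
-- positions = [(-1, -1), (-1, 0), (-1, 1), (0, -1), (0, 1), (1, -1), (1, 0), (1, 1)]
--
-- def mines_of(board, row, column):
--     mines = 0
--     for y, x in positions:
--         if row + y >= 0 and row + y < len(board) and column + x >= 0 and column + x < len(board[row + y]) and board[row + y][column + x] == '*':
--             mines += 1
--     return mines
--
-- def mark_zeros(board, row, column):
--     if board[row][column] in ['*', 'x', '0']:
--         return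
--     mines = mines_of(board, row, column)
--     board[row][column] = 'x'
--     if mines == 0:
--         board[row][column] = '0'
--         for y, x in positions:
--             if row + y >= 0 and row + y < len(board) and column + x >= 0 and column + x < len(board[row + y]):
--                 mark_zeros(board, row + y, column + x)
--
-- def can_create_region_from(board, row, column):
--     if board[row][column] != '.':
--         return False
--
--     mark_zeros(board, row, column)
--     has_zero = False
--     non_zeros = 0
--     for row in board:
--         for cell in row:
--             if cell == '.':
--                 return False
--             elif cell == 'x':
--                 non_zeros += 1
--             elif cell == '0':
--                 has_zero = True
--     return has_zero or non_zeros == 1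
-- ===== SOURCE B (Python) =====
-- positions = [(-1, -1), (-1, 0), (-1, 1), (0, -1), (0, 1), (1, -1), (1, 0), (1, 1)]
--
-- def mines_of(board, row, column):
--     mines = 0
--     for y, x in positions:
--         if row + y >= 0 and row + y < len(board) and column + x >= 0 and column + x < len(board[row + y]) and board[row + y][column + x] == '*':
--             mines += 1
--     return mines
--
-- def can_create_region_from(board, row, column):
--     if board[row][column] != '.':
--         return False
--
--     stack = [(row, column)]
--     while stack:
--         r, c = stack.pop()
--         if board[r][c] in ('*', 'x', '0'):
--             continue
--         mines = mines_of(board, r, c)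
--         board[r][c] = 'x'
--         if mines == 0:
--             board[r][c] = '0'
--             neighbors = [(r + y, c + x) for y, x in positions
--                          if 0 <= r + y < len(board) and 0 <= c + x < len(board[r + y])]
--             stack.extend(reversed(neighbors))
--
--     flat = [cell for board_row in board for cell in board_row]
--     return '.' not in flat and ('0' in flat or flat.count('x') == 1)
-- ===== Notes on version B (the rewrite author's own statement) =====
-- stated objective: idiomatic
-- what changed: The recursive flood-fill mark_zeros is replaced by an iterative loop over an explicit stack with a pop-time visited check, and the early-return double-loop scan is replaced by a flattened membership/count test.
import Mathlib
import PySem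

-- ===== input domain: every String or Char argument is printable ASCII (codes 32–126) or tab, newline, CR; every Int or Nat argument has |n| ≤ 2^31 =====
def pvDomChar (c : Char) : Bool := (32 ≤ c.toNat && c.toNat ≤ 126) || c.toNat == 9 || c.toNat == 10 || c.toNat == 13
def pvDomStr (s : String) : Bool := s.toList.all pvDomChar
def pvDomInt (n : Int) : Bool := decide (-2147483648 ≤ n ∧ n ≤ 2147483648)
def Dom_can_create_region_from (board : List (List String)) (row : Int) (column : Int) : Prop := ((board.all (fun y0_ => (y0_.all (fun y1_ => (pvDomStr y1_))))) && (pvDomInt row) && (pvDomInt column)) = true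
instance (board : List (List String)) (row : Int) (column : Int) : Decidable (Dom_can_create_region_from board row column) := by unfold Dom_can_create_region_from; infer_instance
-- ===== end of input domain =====

-- B replaces A's recursive flood fill by an explicit-stack loop and the early-return
-- double-loop scan by a flattened membership/count test (idiomatic; same cost).
-- Both A and B mutate `board` in place identically; the equivalence proved here is
-- about the RETURN value (the ports thread the board functionally).

-- ===== shared helpers (the Python module constant and helper `mines_of`, plus
-- board-access primitives modelling Python's `board[r][c]` read/write) =====

def pvPositions : List (Int × Int) :=
  [(-1, -1), (-1, 0), (-1, 1), (0, -1), (0, 1), (1, -1), (1, 0), (1, 1)]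

-- board[r][c] as Python reads it (negative indices wrap; default unreachable under Pre_)
def pvGetCell (b : List (List String)) (r c : Int) : String :=
  ((PySem.List.pyGet? b r).bind (fun rowl => PySem.List.pyGet? rowl c)).getD ""

-- board[r][c] would succeed (no IndexError)
def pvValid (b : List (List String)) (r c : Int) : Bool :=
  ((PySem.List.pyGet? b r).bind (fun rowl => PySem.List.pyGet? rowl c)).isSome

-- board[r][c] = v (in-place in Python; functional here)
def pvSetCell (b : List (List String)) (r c : Int) (v : String) : List (List String) :=
  ((PySem.List.pyGet? b r).map (fun rowl => PySem.List.pySetD b r (PySem.List.pySetD rowl c v))).getD b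

-- cell in ['*', 'x', '0']
def pvMarked (s : String) : Bool := s == "*" || s == "x" || s == "0"

-- row+y >= 0 and row+y < len(board) and column+x >= 0 and column+x < len(board[row+y])
def pvInBounds (b : List (List String)) (r c : Int) : Bool :=
  0 ≤ r && r < (b.length : Int) && 0 ≤ c && c < (((PySem.List.pyGet? b r).getD []).length : Int)

def mines_of (board : List (List String)) (row column : Int) : Int :=
  pvPositions.foldl (fun mines yx =>
    if pvInBounds board (row + yx.1) (column + yx.2) &&
       (pvGetCell board (row + yx.1) (column + yx.2) == "*") then mines + 1 else mines) 0

-- number of cells not in ['*','x','0']: the termination fuel/measure of the fills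
def pvUnmarked (b : List (List String)) : Nat :=
  (b.map (fun rowl => rowl.countP (fun s => !pvMarked s))).sum

-- ---- facts the definitions below cite for termination ----

theorem pv_sum_set (l : List Nat) (k : Nat) (x : Nat) (h : k < l.length) :
    (l.set k x).sum + l[k] = l.sum + x := by
  induction l generalizing k with
  | nil => simp at h
  | cons a l ih =>
    cases k with
    | zero => simp [List.set]; omega
    | succ k =>
      simp only [List.set, List.sum_cons, List.getElem_cons_succ]
      have := ih k (by simpa using h)
      omega

theorem pv_pyAt {α : Type} (xs : List α) (i : Int) (a : α)
    (h : PySem.List.pyGet? xs i = some a) :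
    ∃ k, ∃ hk : k < xs.length, xs[k] = a ∧ ∀ v, PySem.List.pySetD xs i v = xs.set k v := by
  unfold PySem.List.pyGet? at h
  cases hidx : PySem.List.pyIdx? xs.length i with
  | none => rw [hidx] at h; simp at h
  | some k =>
    rw [hidx] at h
    simp only [Option.bind_some] at h
    have hk : k < xs.length := (List.getElem?_eq_some_iff.mp h).1
    refine ⟨k, hk, ?_, ?_⟩
    · have := List.getElem?_eq_some_iff.mp h
      exact this.2
    · intro v
      unfold PySem.List.pySetD PySem.List.pySet?
      rw [hidx]
      rfl

theorem pv_pyIdx_lt (n : Nat) (i : Int) (k : Nat)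
    (h : PySem.List.pyIdx? n i = some k) : k < n := by
  unfold PySem.List.pyIdx? at h
  split at h
  · split at h
    · simp only [Option.some.injEq] at h; omega
    · simp at h
  · split at h
    · simp only [Option.some.injEq] at h; omega
    · simp at h

theorem pv_set_none {α : Type} (xs : List α) (i : Int) (v : α)
    (h : PySem.List.pyGet? xs i = none) : PySem.List.pySetD xs i v = xs := by
  unfold PySem.List.pyGet? at h
  unfold PySem.List.pySetD PySem.List.pySet?
  cases hidx : PySem.List.pyIdx? xs.length i with
  | none => rfl
  | some k =>
    rw [hidx] at h
    have := pv_pyIdx_lt _ _ _ hidx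
    simp only [Option.bind_some] at h
    rw [List.getElem?_eq_getElem this] at h
    simp at h

theorem pv_countP_row_le (rowl : List String) (c : Int) (v : String)
    (hv : pvMarked v = true) :
    (PySem.List.pySetD rowl c v).countP (fun s => !pvMarked s) ≤ rowl.countP (fun s => !pvMarked s) := by
  cases hc : PySem.List.pyGet? rowl c with
  | none => rw [pv_set_none _ _ _ hc]
  | some cell =>
    obtain ⟨k, hk, hcell, hset⟩ := pv_pyAt _ _ _ hc
    rw [hset v, List.countP_set hk]
    simp only [hv, Bool.not_true, Bool.false_eq_true, reduceIte]
    omega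

theorem pvUnmarked_set_row_le (b : List (List String)) (rowl rowl' : List String)
    (k : Nat) (hk : k < b.length) (hrow : b[k] = rowl)
    (hle : rowl'.countP (fun s => !pvMarked s) ≤ rowl.countP (fun s => !pvMarked s)) :
    pvUnmarked (b.set k rowl') ≤ pvUnmarked b := by
  unfold pvUnmarked
  rw [List.map_set]
  have hsum := pv_sum_set (b.map (fun rowl => rowl.countP (fun s => !pvMarked s))) k
    (rowl'.countP (fun s => !pvMarked s)) (by simpa using hk)
  rw [List.getElem_map, hrow] at hsum
  have hrowle : rowl.countP (fun s => !pvMarked s) ≤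
      (b.map (fun rowl => rowl.countP (fun s => !pvMarked s))).sum :=
    List.le_sum_of_mem (List.mem_map_of_mem (hrow ▸ List.getElem_mem hk))
  omega

theorem pvUnmarked_set_row_lt (b : List (List String)) (rowl rowl' : List String)
    (k : Nat) (hk : k < b.length) (hrow : b[k] = rowl)
    (hlt : rowl'.countP (fun s => !pvMarked s) < rowl.countP (fun s => !pvMarked s)) :
    pvUnmarked (b.set k rowl') < pvUnmarked b := by
  unfold pvUnmarked
  rw [List.map_set]
  have hsum := pv_sum_set (b.map (fun rowl => rowl.countP (fun s => !pvMarked s))) k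
    (rowl'.countP (fun s => !pvMarked s)) (by simpa using hk)
  rw [List.getElem_map, hrow] at hsum
  have hrowle : rowl.countP (fun s => !pvMarked s) ≤
      (b.map (fun rowl => rowl.countP (fun s => !pvMarked s))).sum :=
    List.le_sum_of_mem (List.mem_map_of_mem (hrow ▸ List.getElem_mem hk))
  omega

theorem pvUnmarked_set_le (b : List (List String)) (r c : Int) (v : String)
    (hv : pvMarked v = true) : pvUnmarked (pvSetCell b r c v) ≤ pvUnmarked b := by
  unfold pvSetCell
  cases hr : PySem.List.pyGet? b r with
  | none => simp
  | some rowl =>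
    obtain ⟨k, hk, hrow, hset⟩ := pv_pyAt _ _ _ hr
    simp only [Option.map_some, Option.getD_some]
    rw [hset]
    exact pvUnmarked_set_row_le b rowl _ k hk hrow (pv_countP_row_le rowl c v hv)

theorem pvUnmarked_set_lt (b : List (List String)) (r c : Int) (v : String)
    (hv : pvMarked v = true) (hV : pvValid b r c = true)
    (hM : pvMarked (pvGetCell b r c) = false) :
    pvUnmarked (pvSetCell b r c v) < pvUnmarked b := by
  unfold pvValid at hV
  unfold pvGetCell at hM
  unfold pvSetCell
  cases hr : PySem.List.pyGet? b r with
  | none => rw [hr] at hV; simp at hV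
  | some rowl =>
    rw [hr] at hV hM
    simp only [Option.bind_some] at hV hM
    cases hc : PySem.List.pyGet? rowl c with
    | none => simp [hc] at hV
    | some cell =>
      rw [hc] at hM
      simp only [Option.getD_some] at hM
      obtain ⟨k, hk, hrow, hset⟩ := pv_pyAt _ _ _ hr
      obtain ⟨kc, hkc, hcell, hsetc⟩ := pv_pyAt _ _ _ hc
      simp only [Option.map_some, Option.getD_some]
      rw [hset]
      refine pvUnmarked_set_row_lt b rowl _ k hk hrow ?_
      rw [hsetc v, List.countP_set hkc, hcell]
      have hpos : 0 < rowl.countP (fun s => !pvMarked s) := by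
        rw [List.countP_pos_iff]
        exact ⟨cell, hcell ▸ List.getElem_mem hkc, by simp [hM]⟩
      simp only [hM, hv, Bool.not_false, Bool.not_true, Bool.false_eq_true, reduceIte]
      omega

-- ===== PORT A =====
-- mark_zeros, with a fuel guard for totality only (Python's recursion marks one cell
-- before each recursive descent, so fuel = pvUnmarked board is always enough; the
-- fuel-0 branch is unreachable on the fuel the port passes).
mutual
def mark_zeros : Nat → List (List String) → Int → Int → List (List String)
  | 0, b, _, _ => b
  | Nat.succ f, b, row, column =>
    if pvValid b row column = false then b   -- totality guard: Python raises here (outside Pre_)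
    else if pvMarked (pvGetCell b row column) then b
    else
      let mines := mines_of b row column
      let b1 := pvSetCell b row column "x"
      if mines = 0 then
        mark_zeros_nbrs f (pvSetCell b1 row column "0") row column pvPositions
      else b1
termination_by f _ _ _ => (f, 0)

def mark_zeros_nbrs : Nat → List (List String) → Int → Int → List (Int × Int) → List (List String)
  | _, b, _, _, [] => b
  | f, b, row, column, yx :: rest =>
      let b' := if pvInBounds b (row + yx.1) (column + yx.2)
                then mark_zeros f b (row + yx.1) (column + yx.2) else b
      mark_zeros_nbrs f b' row column rest
termination_by f _ _ _ ns => (f, ns.length + 1)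
end

-- the scan `for row in board: for cell in row: …` with its early `return False`
-- (none = early return; accumulators (non_zeros, has_zero))
def pvScanCells : List String → Int → Bool → Option (Int × Bool)
  | [], nz, hz => some (nz, hz)
  | cell :: rest, nz, hz =>
    if cell == "." then none
    else if cell == "x" then pvScanCells rest (nz + 1) hz
    else if cell == "0" then pvScanCells rest nz true
    else pvScanCells rest nz hz

def pvScanRows : List (List String) → Int → Bool → Option (Int × Bool)
  | [], nz, hz => some (nz, hz)
  | rowl :: rest, nz, hz =>
    match pvScanCells rowl nz hz with
    | none => none
    | some (nz', hz') => pvScanRows rest nz' hz'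

def can_create_region_from (board : List (List String)) (row : Int) (column : Int) : Bool :=
  if pvGetCell board row column ≠ "." then false
  else
    match pvScanRows (mark_zeros (pvUnmarked board) board row column) 0 false with
    | none => false
    | some (nz, hz) => hz || (nz == 1)

-- ===== PORT B =====
-- while stack: … ; Lean list head = top of the Python stack, so Python's
-- stack.extend(reversed(neighbors)) is `neighbors ++ stack`.
def floodLoop (b : List (List String)) (stack : List (Int × Int)) : List (List String) :=
  match stack with
  | [] => b
  | rc :: stack' =>
    if pvValid b rc.1 rc.2 = false then floodLoop b stack'   -- totality guard: Python raises here (outside Pre_)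
    else if pvMarked (pvGetCell b rc.1 rc.2) then floodLoop b stack'
    else
      let mines := mines_of b rc.1 rc.2
      let b1 := pvSetCell b rc.1 rc.2 "x"
      if mines = 0 then
        let b2 := pvSetCell b1 rc.1 rc.2 "0"
        let neighbors := pvPositions.filterMap (fun yx =>
          if pvInBounds b2 (rc.1 + yx.1) (rc.2 + yx.2)
          then some (rc.1 + yx.1, rc.2 + yx.2) else none)
        floodLoop b2 (neighbors ++ stack')
      else floodLoop b1 stack'
termination_by (pvUnmarked b, stack.length)
decreasing_by
  · exact Prod.Lex.right _ (by simp)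
  · exact Prod.Lex.right _ (by simp)
  · apply Prod.Lex.left
    calc pvUnmarked (pvSetCell (pvSetCell b rc.1 rc.2 "x") rc.1 rc.2 "0")
        ≤ pvUnmarked (pvSetCell b rc.1 rc.2 "x") := pvUnmarked_set_le _ _ _ _ rfl
      _ < pvUnmarked b := pvUnmarked_set_lt _ _ _ _ rfl (by simpa using ‹¬ pvValid b rc.1 rc.2 = false›) (by simpa using ‹¬ pvMarked (pvGetCell b rc.1 rc.2) = true›)
  · apply Prod.Lex.left
    exact pvUnmarked_set_lt _ _ _ _ rfl (by simpa using ‹¬ pvValid b rc.1 rc.2 = false›) (by simpa using ‹¬ pvMarked (pvGetCell b rc.1 rc.2) = true›)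

def can_create_region_from_alt (board : List (List String)) (row : Int) (column : Int) : Bool :=
  if pvGetCell board row column ≠ "." then false
  else
    let fin := floodLoop board [(row, column)]
    let flat := fin.flatMap id
    !(flat.contains ".") && (flat.contains "0" || (flat.count "x" == 1))

-- ===== PRECONDITION & SPEC =====
-- Pre_ excludes exactly the inputs where Python A raises IndexError on the very first
-- read board[row][column] (index out of range, after Python's negative wrap).
def Pre_can_create_region_from (board : List (List String)) (row : Int) (column : Int) : Prop :=
  pvValid board row column = true
instance (board : List (List String)) (row : Int) (column : Int) : Decidable (Pre_can_create_region_from board row column) := by unfold Pre_can_create_region_from; infer_instance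

def pvWitness_can_create_region_from : List (List String) × Int × Int :=
  ([[".", "."], [".", "*"]], 0, 0)

def Spec_can_create_region_from (board : List (List String)) (row : Int) (column : Int) (out : Bool) : Prop := out = can_create_region_from_alt board row column
instance (board : List (List String)) (row : Int) (column : Int) (out : Bool) : Decidable (Spec_can_create_region_from board row column out) := by unfold Spec_can_create_region_from; infer_instance

-- ===== CLAIM (what is proved, stated in full; the proofs are below) =====
def Claim_equal_can_create_region_from : Prop := ∀ (board : List (List String)) (row : Int) (column : Int), Dom_can_create_region_from board row column → Pre_can_create_region_from board row column → Spec_can_create_region_from board row column (can_create_region_from board row column)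

-- ===== LEMMAS AND PROOFS =====

-- setting a cell never changes the row lengths (the board's shape)
theorem pv_shape_setCell (b : List (List String)) (r c : Int) (v : String) :
    (pvSetCell b r c v).map List.length = b.map List.length := by
  unfold pvSetCell
  cases hr : PySem.List.pyGet? b r with
  | none => simp
  | some rowl =>
    obtain ⟨k, hk, hrow, hset⟩ := pv_pyAt _ _ _ hr
    simp only [Option.map_some, Option.getD_some]
    rw [hset, List.map_set]
    have hlen : (PySem.List.pySetD rowl c v).length = rowl.length := by
      unfold PySem.List.pySetD PySem.List.pySet?
      cases hidx : PySem.List.pyIdx? rowl.length c <;> simp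
    rw [hlen]
    have hgk : (b.map List.length)[k]'(by simpa using hk) = rowl.length := by
      rw [List.getElem_map, hrow]
    rw [← hgk, List.set_getElem_self]

theorem pv_len_pyGet_congr (b b' : List (List String))
    (h : b.map List.length = b'.map List.length) (r : Int) :
    ((PySem.List.pyGet? b r).getD []).length = ((PySem.List.pyGet? b' r).getD []).length := by
  have hlen : b.length = b'.length := by
    have := congrArg List.length h; simpa using this
  unfold PySem.List.pyGet?
  rw [hlen]
  cases hidx : PySem.List.pyIdx? b'.length r with
  | none => simp
  | some k =>
    simp only [Option.bind_some]
    have h2 : b[k]?.map List.length = b'[k]?.map List.length := by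
      rw [← List.getElem?_map, ← List.getElem?_map, h]
    cases hx : b[k]? with
    | none =>
      rw [hx] at h2
      cases hy : b'[k]? with
      | none => simp
      | some w => rw [hy] at h2; simp at h2
    | some w =>
      rw [hx] at h2
      cases hy : b'[k]? with
      | none => rw [hy] at h2; simp at h2
      | some w' =>
        rw [hy] at h2
        simp only [Option.map_some, Option.some.injEq] at h2
        simp [h2]

theorem pvInBounds_congr (b b' : List (List String))
    (h : b.map List.length = b'.map List.length) (r c : Int) :
    pvInBounds b r c = pvInBounds b' r c := by
  have hlen : b.length = b'.length := by
    have := congrArg List.length h; simpa using this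
  unfold pvInBounds
  rw [hlen, pv_len_pyGet_congr b b' h r]

-- mark_zeros / mark_zeros_nbrs never increase the unmarked count and preserve the shape
theorem pv_nbrs_meas_of (f : Nat)
    (H : ∀ b r c, pvUnmarked (mark_zeros f b r c) ≤ pvUnmarked b ∧
          (mark_zeros f b r c).map List.length = b.map List.length) :
    ∀ (ns : List (Int × Int)) (b : List (List String)) (r c : Int),
      pvUnmarked (mark_zeros_nbrs f b r c ns) ≤ pvUnmarked b ∧
      (mark_zeros_nbrs f b r c ns).map List.length = b.map List.length := by
  intro ns
  induction ns with
  | nil => intro b r c; simp [mark_zeros_nbrs]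
  | cons yx rest ih =>
    intro b r c
    rw [mark_zeros_nbrs]
    by_cases hib : pvInBounds b (r + yx.1) (c + yx.2) = true
    · simp only [hib, if_true]
      obtain ⟨h1, h2⟩ := H b (r + yx.1) (c + yx.2)
      obtain ⟨h3, h4⟩ := ih (mark_zeros f b (r + yx.1) (c + yx.2)) r c
      exact ⟨le_trans h3 h1, h4.trans h2⟩
    · simp only [Bool.not_eq_true] at hib
      simp only [hib, Bool.false_eq_true, if_false]
      exact ih b r c

theorem pv_mz_meas : ∀ (f : Nat) (b : List (List String)) (r c : Int),
    pvUnmarked (mark_zeros f b r c) ≤ pvUnmarked b ∧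
    (mark_zeros f b r c).map List.length = b.map List.length := by
  intro f
  induction f with
  | zero => intro b r c; simp [mark_zeros]
  | succ f ih =>
    intro b r c
    rw [mark_zeros]
    by_cases hV : pvValid b r c = false
    · simp [hV]
    · simp only [hV]
      by_cases hMk : pvMarked (pvGetCell b r c) = true
      · simp [hMk]
      · simp only [hMk, Bool.false_eq_true, if_false]
        have hx1 : pvUnmarked (pvSetCell b r c "x") ≤ pvUnmarked b :=
          pvUnmarked_set_le b r c "x" rfl
        have hx2 : (pvSetCell b r c "x").map List.length = b.map List.length :=
          pv_shape_setCell b r c "x"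
        by_cases hm : mines_of b r c = 0
        · simp only [hm, if_true]
          have h01 : pvUnmarked (pvSetCell (pvSetCell b r c "x") r c "0") ≤
              pvUnmarked (pvSetCell b r c "x") := pvUnmarked_set_le _ r c "0" rfl
          have h02 := pv_shape_setCell (pvSetCell b r c "x") r c "0"
          obtain ⟨h3, h4⟩ := pv_nbrs_meas_of f ih pvPositions
            (pvSetCell (pvSetCell b r c "x") r c "0") r c
          exact ⟨le_trans h3 (le_trans h01 hx1), h4.trans (h02.trans hx2)⟩
        · simp only [hm, if_false]
          exact ⟨hx1, hx2⟩

-- if nothing is unmarked, every readable cell is marked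
theorem pv_all_marked (b : List (List String)) (r c : Int)
    (h0 : pvUnmarked b = 0) (hV : pvValid b r c = true) :
    pvMarked (pvGetCell b r c) = true := by
  unfold pvValid at hV
  unfold pvGetCell
  cases hr : PySem.List.pyGet? b r with
  | none => rw [hr] at hV; simp at hV
  | some rowl =>
    rw [hr] at hV
    simp only [Option.bind_some] at hV
    cases hc : PySem.List.pyGet? rowl c with
    | none => rw [hc] at hV; simp at hV
    | some cell =>
      simp only [Option.bind_some, hc, Option.getD_some]
      obtain ⟨k, hk, hrow, _⟩ := pv_pyAt _ _ _ hr
      obtain ⟨kc, hkc, hcell, _⟩ := pv_pyAt _ _ _ hc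
      by_contra hne
      have hcnt : 0 < rowl.countP (fun s => !pvMarked s) := by
        rw [List.countP_pos_iff]
        exact ⟨cell, hcell ▸ List.getElem_mem hkc, by simp [Bool.not_eq_true] at hne ⊢; exact hne⟩
      have hmem : rowl.countP (fun s => !pvMarked s) ∈
          (b.map (fun rowl => rowl.countP (fun s => !pvMarked s))) :=
        List.mem_map_of_mem (hrow ▸ List.getElem_mem hk)
      unfold pvUnmarked at h0
      have := List.sum_eq_zero_iff.mp h0 _ hmem
      omega

-- THE BRIDGE: running the explicit stack on (r,c)::S is running A's recursive
-- mark_zeros on (r,c) first (any fuel ≥ the unmarked count), then the rest of the stack.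
theorem pv_flood_mark : ∀ (fuel : Nat) (b : List (List String)) (r c : Int) (S : List (Int × Int)),
    pvUnmarked b ≤ fuel →
    floodLoop b ((r, c) :: S) = floodLoop (mark_zeros fuel b r c) S := by
  intro fuel
  induction fuel with
  | zero =>
    intro b r c S h0
    have h0' : pvUnmarked b = 0 := Nat.le_zero.mp h0
    have hz0 : mark_zeros 0 b r c = b := by rw [mark_zeros]
    rw [hz0]
    by_cases hV : pvValid b r c = false
    · rw [floodLoop]; simp [hV]
    · have hVt : pvValid b r c = true := by simpa using hV
      have hMk := pv_all_marked b r c h0' hVt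
      rw [floodLoop]; simp [hV, hMk]
  | succ f ih =>
    intro b r c S h
    by_cases hV : pvValid b r c = false
    · rw [floodLoop, mark_zeros]; simp [hV]
    · have hVt : pvValid b r c = true := by simpa using hV
      by_cases hMk : pvMarked (pvGetCell b r c) = true
      · rw [floodLoop, mark_zeros]; simp [hV, hMk]
      · by_cases hm : mines_of b r c = 0
        · rw [floodLoop, mark_zeros]
          simp only [hV, Bool.false_eq_true, if_false, hMk, hm, if_true]
          have hb1 : pvUnmarked (pvSetCell b r c "x") < pvUnmarked b :=
            pvUnmarked_set_lt b r c "x" rfl hVt (by simpa using hMk)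
          have hb2 : pvUnmarked (pvSetCell (pvSetCell b r c "x") r c "0") ≤ f := by
            have := pvUnmarked_set_le (pvSetCell b r c "x") r c "0" rfl
            omega
          have hN : ∀ (ns : List (Int × Int)) (bb : List (List String)) (S' : List (Int × Int)),
              pvUnmarked bb ≤ f →
              bb.map List.length = (pvSetCell (pvSetCell b r c "x") r c "0").map List.length →
              floodLoop bb ((ns.filterMap (fun yx =>
                if pvInBounds (pvSetCell (pvSetCell b r c "x") r c "0") (r + yx.1) (c + yx.2)
                then some (r + yx.1, c + yx.2) else none)) ++ S')
              = floodLoop (mark_zeros_nbrs f bb r c ns) S' := by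
            intro ns
            induction ns with
            | nil => intro bb S' _ _; simp [mark_zeros_nbrs]
            | cons yx rest ihn =>
              intro bb S' hbb hsh
              rw [List.filterMap_cons, mark_zeros_nbrs]
              have hib : pvInBounds bb (r + yx.1) (c + yx.2)
                  = pvInBounds (pvSetCell (pvSetCell b r c "x") r c "0") (r + yx.1) (c + yx.2) :=
                pvInBounds_congr _ _ hsh _ _
              by_cases hin : pvInBounds (pvSetCell (pvSetCell b r c "x") r c "0")
                  (r + yx.1) (c + yx.2) = true
              · simp only [hin, if_true, hib ▸ hin, List.cons_append]
                rw [ih bb (r + yx.1) (c + yx.2) _ hbb]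
                obtain ⟨hmo, hshm⟩ := pv_mz_meas f bb (r + yx.1) (c + yx.2)
                exact ihn (mark_zeros f bb (r + yx.1) (c + yx.2)) S'
                  (le_trans hmo hbb) (hshm.trans hsh)
              · simp only [Bool.not_eq_true] at hin
                have hin' : pvInBounds bb (r + yx.1) (c + yx.2) = false := by rw [hib, hin]
                simp only [hin, hin', Bool.false_eq_true, if_false]
                exact ihn bb S' hbb hsh
          exact hN pvPositions (pvSetCell (pvSetCell b r c "x") r c "0") S hb2 rfl
        · rw [floodLoop, mark_zeros]
          simp [hV, hMk, hm]

-- the early-return scan, in closed form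
theorem pvScanCells_eq (l : List String) (nz : Int) (hz : Bool) :
    pvScanCells l nz hz =
      if l.contains "." then none
      else some (nz + (l.count "x" : Int), hz || l.contains "0") := by
  induction l generalizing nz hz with
  | nil => simp [pvScanCells]
  | cons a l ih =>
    rw [pvScanCells]
    by_cases ha : a = "."
    · simp [ha]
    · have ha' : ¬("." = a) := fun h => ha h.symm
      by_cases hx : a = "x"
      · subst hx
        rw [if_neg (by simp only [beq_iff_eq]; exact ha), if_pos (by simp), ih]
        by_cases hmem : "." ∈ l
        · simp [hmem]
        · simp [hmem, Prod.ext_iff]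
          try omega
      · have hx' : ¬("x" = a) := fun h => hx h.symm
        by_cases h0 : a = "0"
        · subst h0
          rw [if_neg (by simp only [beq_iff_eq]; exact ha), if_neg (by simp only [beq_iff_eq]; exact hx), if_pos (by simp), ih]
          by_cases hmem : "." ∈ l
          · simp [hmem]
          · simp [hmem]
        · have h0' : ¬("0" = a) := fun h => h0 h.symm
          rw [if_neg (by simp [ha]), if_neg (by simp [hx]), if_neg (by simp [h0]), ih]
          by_cases hmem : "." ∈ l
          · simp [hmem, ha']
          · simp [hmem, ha', h0', hx]

theorem pvScanRows_eq (rows : List (List String)) (nz : Int) (hz : Bool) :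
    pvScanRows rows nz hz =
      if (rows.flatMap id).contains "." then none
      else some (nz + ((rows.flatMap id).count "x" : Int), hz || (rows.flatMap id).contains "0") := by
  induction rows generalizing nz hz with
  | nil => simp [pvScanRows]
  | cons rowl rest ih =>
    rw [pvScanRows, pvScanCells_eq]
    by_cases hmem : "." ∈ rowl
    · simp [hmem]
    · by_cases hmem2 : "." ∈ rest.flatMap id
      · have h2 : ∃ l ∈ rest, "." ∈ l := by simpa using List.mem_flatMap.mp hmem2
        simp [hmem, h2, ih]
      · have h2 : ¬ ∃ l ∈ rest, "." ∈ l := by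
          rintro ⟨l0, hl0, hd⟩
          exact hmem2 (List.mem_flatMap.mpr ⟨l0, hl0, hd⟩)
        simp [hmem, h2, ih, List.count_append, Prod.ext_iff, Bool.or_assoc]
        try omega

-- ===== VERDICT (by name: the statement is the Claim_ definition above) =====
theorem pv_cast_beq_one (n : Nat) : (((n : Int)) == 1) = (n == 1) := by
  by_cases h : n = 1 <;> simp [h, Nat.cast_eq_one]

theorem can_create_region_from_spec : Claim_equal_can_create_region_from := by
  intro board row column _ _
  unfold Spec_can_create_region_from
  unfold can_create_region_from can_create_region_from_alt
  by_cases hdot : pvGetCell board row column = "."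
  · rw [if_neg (by simp [hdot]), if_neg (by simp [hdot])]
    have hflood : floodLoop board [(row, column)] = mark_zeros (pvUnmarked board) board row column := by
      rw [pv_flood_mark (pvUnmarked board) board row column [] (le_refl _), floodLoop]
    simp only [hflood]
    rw [pvScanRows_eq]
    by_cases hc : "." ∈ (mark_zeros (pvUnmarked board) board row column).flatMap id
    · have hE : ∃ l ∈ mark_zeros (pvUnmarked board) board row column, "." ∈ l := by
        simpa using List.mem_flatMap.mp hc
      simp [hE]
    · have hE : ¬ ∃ l ∈ mark_zeros (pvUnmarked board) board row column, "." ∈ l := by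
        rintro ⟨l0, hl0, hd⟩
        exact hc (List.mem_flatMap.mpr ⟨l0, hl0, hd⟩)
      simp [hE, pv_cast_beq_one]
  · rw [if_pos (by simp [hdot]), if_pos (by simp [hdot])]
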